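-- pv_equiv track=rewrite | github.com/MrPio/All-Possible-Connected-Graphs | algorithm.py | find_configs
-- ===== SOURCE A (Python) =====
-- def find_configs(n, k1, k2, lo_limits, hi_limits) -> list[list[int]]:
--     # params = '-'.join([str(n), str(k1), str(k2), ''.join(str(lo_limits)), ''.join(str(hi_limits))])
--     # if params in find_configs_cache.keys():
--     #     return find_configs_cache[params]
--
--     new_k2 = 9999 if k2 <= -1 else k2
--     current_list = []
--
--     if n == 1:
--         return [[i] for i in range(max(lo_limits[0], k1), min(hi_limits[0], new_k2) + 1)]
--     tails = find_configs(
--         n - 1,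
--         k1 - hi_limits[0],
--         k2 - lo_limits[0],
--         lo_limits[1:],
--         hi_limits[1:]
--     )
--     for tail in tails:
--         for i in range(max(lo_limits[0], k1 - sum(tail)),  # max(3, 5) = 5
--                        min(hi_limits[0], new_k2 - sum(tail)) + 1):  # min(6, inf) = 6
--             current_list.append([i] + tail)
--
--     # find_configs_cache[params] = current_list
--     return current_list
-- ===== SOURCE B (Python) =====
-- def find_configs(n, k1, k2, lo_limits, hi_limits) -> list[list[int]]:
--     # Iterative bottom-up build: precompute per-level transformed bounds, then
--     # extend configs from the deepest level upward.
--     levels = []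
--     K1, K2 = k1, k2
--     for i in range(n):
--         levels.append((lo_limits[i], hi_limits[i], K1, 9999 if K2 <= -1 else K2))
--         K1 -= hi_limits[i]
--         K2 -= lo_limits[i]
--     lo_l, hi_l, a, b = levels[-1]
--     configs = [[v] for v in range(max(lo_l, a), min(hi_l, b) + 1)]
--     for lo_l, hi_l, a, b in reversed(levels[:-1]):
--         configs = [[v] + tail for tail in configs
--                    for v in range(max(lo_l, a - sum(tail)), min(hi_l, b - sum(tail)) + 1)]
--     return configs
-- ===== Notes on version B (the rewrite author's own statement) =====
-- stated objective: alternative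
-- what changed: Replaces A's top-down recursion by an iterative bottom-up build: per-level transformed bounds (k1 minus hi-prefix-sum, sentinel-capped k2 minus lo-prefix-sum) are precomputed once, then configurations are extended from the deepest level upward by a fold.
import Mathlib
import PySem

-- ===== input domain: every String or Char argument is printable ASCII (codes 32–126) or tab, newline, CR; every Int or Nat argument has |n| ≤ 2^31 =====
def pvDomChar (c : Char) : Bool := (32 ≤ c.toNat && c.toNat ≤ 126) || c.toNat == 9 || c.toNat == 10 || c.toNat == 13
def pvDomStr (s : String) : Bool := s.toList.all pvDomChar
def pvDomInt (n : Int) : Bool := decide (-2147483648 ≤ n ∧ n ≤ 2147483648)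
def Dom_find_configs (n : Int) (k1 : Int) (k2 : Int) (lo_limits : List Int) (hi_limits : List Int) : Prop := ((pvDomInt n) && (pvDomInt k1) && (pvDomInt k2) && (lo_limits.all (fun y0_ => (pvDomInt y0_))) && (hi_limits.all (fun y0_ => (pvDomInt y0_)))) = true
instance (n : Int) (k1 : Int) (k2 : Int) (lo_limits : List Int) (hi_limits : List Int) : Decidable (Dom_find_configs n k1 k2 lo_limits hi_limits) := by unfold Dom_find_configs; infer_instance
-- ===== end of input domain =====

-- B replaces A's recursion by an iterative bottom-up build: precompute the per-level
-- transformed bounds once, then extend configurations from the deepest level upward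
-- (objective: alternative decomposition, same asymptotic cost).

-- ===== PORT A =====
-- Literal port of A: recursion structurally on the lists (Python recurses on n with
-- lo_limits[1:], hi_limits[1:]; under Pre_ both descents coincide; on empty lists,
-- where Python raises IndexError, the port returns []).
def find_configs (n : Int) (k1 : Int) (k2 : Int) (lo_limits : List Int) (hi_limits : List Int) : List (List Int) :=
  let new_k2 : Int := if k2 ≤ -1 then 9999 else k2
  match lo_limits, hi_limits with
  | l0 :: lrest, h0 :: hrest =>
    if n = 1 then
      (PySem.List.pyRange (max l0 k1) (min h0 new_k2 + 1) 1).map (fun i => [i])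
    else
      let tails := find_configs (n - 1) (k1 - h0) (k2 - l0) lrest hrest
      tails.foldl (fun current_list tail =>
        current_list ++
          (PySem.List.pyRange (max l0 (k1 - tail.sum)) (min h0 (new_k2 - tail.sum) + 1) 1).map
            (fun i => i :: tail)) []
  | _, _ => []  -- Python raises IndexError here (excluded by Pre_)

-- ===== PORT B =====
-- per-level transformed bounds: (lo[i], hi[i], k1 - sum hi[0:i], sentinel (k2 - sum lo[0:i]))
def fcLevels (n : Int) (k1 : Int) (k2 : Int) (lo_limits : List Int) (hi_limits : List Int) : List (Int × Int × Int × Int) :=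
  match lo_limits with
  | [] => []  -- Python raises IndexError here when 0 < n (excluded by Pre_)
  | l0 :: lrest =>
    match hi_limits with
    | [] => []  -- likewise
    | h0 :: hrest =>
      if n ≤ 0 then []
      else (l0, h0, k1, if k2 ≤ -1 then 9999 else k2) :: fcLevels (n - 1) (k1 - h0) (k2 - l0) lrest hrest

-- one upward step: prepend every admissible value to every tail
def fcStep (configs : List (List Int)) (lvl : Int × Int × Int × Int) : List (List Int) :=
  configs.flatMap (fun tail =>
    (PySem.List.pyRange (max lvl.1 (lvl.2.2.1 - tail.sum)) (min lvl.2.1 (lvl.2.2.2 - tail.sum) + 1) 1).map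
      (fun v => v :: tail))

def find_configs_alt (n : Int) (k1 : Int) (k2 : Int) (lo_limits : List Int) (hi_limits : List Int) : List (List Int) :=
  let levels := fcLevels n k1 k2 lo_limits hi_limits
  match levels.getLast? with
  | none => []  -- Python raises IndexError on levels[-1] (excluded by Pre_)
  | some (lo_l, hi_l, a, b) =>
    let init := (PySem.List.pyRange (max lo_l a) (min hi_l b + 1) 1).map (fun v => [v])
    levels.dropLast.reverse.foldl fcStep init

-- ===== PRECONDITION & SPEC =====
-- Pre_: exactly where A returns — A raises IndexError when n < 1 or either list is
-- shorter than n.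
def Pre_find_configs (n : Int) (k1 : Int) (k2 : Int) (lo_limits : List Int) (hi_limits : List Int) : Prop :=
  1 ≤ n ∧ n ≤ (lo_limits.length : Int) ∧ n ≤ (hi_limits.length : Int)
instance (n : Int) (k1 : Int) (k2 : Int) (lo_limits : List Int) (hi_limits : List Int) : Decidable (Pre_find_configs n k1 k2 lo_limits hi_limits) := by unfold Pre_find_configs; infer_instance
def pvWitness_find_configs : Int × Int × Int × List Int × List Int := (2, 1, 4, [0, 0], [3, 3])

def Spec_find_configs (n : Int) (k1 : Int) (k2 : Int) (lo_limits : List Int) (hi_limits : List Int) (out : List (List Int)) : Prop := out = find_configs_alt n k1 k2 lo_limits hi_limits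
instance (n : Int) (k1 : Int) (k2 : Int) (lo_limits : List Int) (hi_limits : List Int) (out : List (List Int)) : Decidable (Spec_find_configs n k1 k2 lo_limits hi_limits out) := by unfold Spec_find_configs; infer_instance

-- ===== CLAIM (what is proved, stated in full; the proofs are below) =====
def Claim_equal_find_configs : Prop := ∀ (n : Int) (k1 : Int) (k2 : Int) (lo_limits : List Int) (hi_limits : List Int), Dom_find_configs n k1 k2 lo_limits hi_limits → Pre_find_configs n k1 k2 lo_limits hi_limits → Spec_find_configs n k1 k2 lo_limits hi_limits (find_configs n k1 k2 lo_limits hi_limits)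

-- ===== LEMMAS AND PROOFS =====

theorem fcLevels_nonpos (n k1 k2 : Int) (lo hi : List Int) (h : n ≤ 0) :
    fcLevels n k1 k2 lo hi = [] := by
  cases lo <;> cases hi <;> simp [fcLevels, h]

theorem fcLevels_ne_nil (n : Int) (k1 k2 : Int) (l0 h0 : Int) (lrest hrest : List Int)
    (hn : 1 ≤ n) : fcLevels n k1 k2 (l0 :: lrest) (h0 :: hrest) ≠ [] := by
  unfold fcLevels
  simp [show ¬ n ≤ 0 by omega]

theorem fc_main (lo_limits : List Int) : ∀ (hi_limits : List Int) (n k1 k2 : Int),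
    1 ≤ n → n ≤ (lo_limits.length : Int) → n ≤ (hi_limits.length : Int) →
    find_configs n k1 k2 lo_limits hi_limits = find_configs_alt n k1 k2 lo_limits hi_limits := by
  induction lo_limits with
  | nil => intro hi n k1 k2 hn hl _; simp at hl; omega
  | cons l0 lrest ih =>
    intro hi n k1 k2 hn hl hh
    match hi with
    | [] => simp at hh; omega
    | h0 :: hrest =>
      by_cases h1 : n = 1
      · subst h1
        simp only [find_configs, find_configs_alt]
        rw [show fcLevels 1 k1 k2 (l0 :: lrest) (h0 :: hrest) =
            [(l0, h0, k1, if k2 ≤ -1 then 9999 else k2)] from by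
          unfold fcLevels
          simp [fcLevels_nonpos]]
        simp
      · have hn2 : 2 ≤ n := by omega
        have hrec := ih hrest (n - 1) (k1 - h0) (k2 - l0) (by omega)
          (by simp at hl ⊢; omega) (by simp at hh ⊢; omega)
        -- rest of levels is nonempty
        obtain ⟨l1, lrest', rfl⟩ : ∃ l1 lrest', lrest = l1 :: lrest' := by
          match lrest with
          | [] => simp at hl; omega
          | a :: b => exact ⟨a, b, rfl⟩
        obtain ⟨h1', hrest', rfl⟩ : ∃ h1 hrest', hrest = h1 :: hrest' := by
          match hrest with
          | [] => simp at hh; omega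
          | a :: b => exact ⟨a, b, rfl⟩
        have hne := fcLevels_ne_nil (n - 1) (k1 - h0) (k2 - l0) l1 h1' lrest' hrest' (by omega)
        -- unfold A one step
        rw [show find_configs n k1 k2 (l0 :: l1 :: lrest') (h0 :: h1' :: hrest') =
            fcStep (find_configs (n - 1) (k1 - h0) (k2 - l0) (l1 :: lrest') (h1' :: hrest'))
              (l0, h0, k1, if k2 ≤ -1 then 9999 else k2) from ?_]
        · rw [hrec]
          -- unfold B one step
          unfold find_configs_alt
          rw [show fcLevels n k1 k2 (l0 :: l1 :: lrest') (h0 :: h1' :: hrest') =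
              (l0, h0, k1, if k2 ≤ -1 then 9999 else k2) ::
                fcLevels (n - 1) (k1 - h0) (k2 - l0) (l1 :: lrest') (h1' :: hrest') from by
            conv_lhs => rw [fcLevels]
            simp [show ¬ n ≤ 0 by omega]]
          generalize hlv : fcLevels (n - 1) (k1 - h0) (k2 - l0) (l1 :: lrest') (h1' :: hrest') = lv at hne
          match lv, hne with
          | x :: xs, _ =>
            simp only [List.getLast?_cons_cons]
            cases hgl : (x :: xs).getLast? with
            | none => simp at hgl
            | some last =>
              obtain ⟨a1, a2, a3, a4⟩ := last
              have hdl : ((l0, h0, k1, if k2 ≤ -1 then 9999 else k2) :: x :: xs).dropLast.reverse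
                  = (x :: xs).dropLast.reverse ++ [(l0, h0, k1, if k2 ≤ -1 then 9999 else k2)] := by
                simp [List.dropLast_cons_of_ne_nil]
              dsimp only
              rw [hdl, List.foldl_append]
              simp
        · -- A's foldl-append over tails is fcStep
          conv_lhs => rw [find_configs]
          simp only [show ¬ n = 1 by omega, if_false]
          rw [PySem.List.foldl_append_eq_flatMap]
          rfl

-- ===== VERDICT (by name: the statement is the Claim_ definition above) =====
theorem find_configs_spec : Claim_equal_find_configs := by
  intro n k1 k2 lo hi _ hpre
  unfold Spec_find_configs
  exact fc_main lo hi n k1 k2 hpre.1 hpre.2.1 hpre.2.2
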